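-- pv_equiv track=rewrite | github.com/gether-life/parse-bubble-app-export | parser/apis.py | _paths_match
-- ===== SOURCE A (Python) =====
-- def _paths_match(swagger_path: str, observed_path: str) -> bool:
--     swagger_parts = [part for part in swagger_path.strip("/").split("/") if part]
--     observed_parts = [part for part in observed_path.strip("/").split("/") if part]
--     if len(swagger_parts) != len(observed_parts):
--         return False
--     for swagger_part, observed_part in zip(swagger_parts, observed_parts):
--         if swagger_part.startswith("{") and swagger_part.endswith("}"):
--             continue
--         if swagger_part != observed_part:
--             return False
--     return True
-- ===== SOURCE B (Python) =====
-- def _match(pattern, parts):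
--     if not pattern or not parts:
--         return not pattern and not parts
--     tok, seg = pattern[0], parts[0]
--     return (tok is None or tok == seg) and _match(pattern[1:], parts[1:])
--
--
-- def _paths_match(swagger_path: str, observed_path: str) -> bool:
--     # Compile the swagger template into a pattern: None = wildcard segment.
--     pattern = [None if p.startswith("{") and p.endswith("}") else p
--                for p in swagger_path.split("/") if p]
--     observed = [p for p in observed_path.split("/") if p]
--     return _match(pattern, observed)
-- ===== Notes on version B (the rewrite author's own statement) =====
-- stated objective: alternative
-- what changed: B compiles the swagger template once into an Option-pattern (None for {placeholder} segments), drops the redundant strip('/') and the explicit length pre-check, and matches the observed segments against the pattern by structural recursion instead of A's zip loop with early returns.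
import Mathlib
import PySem

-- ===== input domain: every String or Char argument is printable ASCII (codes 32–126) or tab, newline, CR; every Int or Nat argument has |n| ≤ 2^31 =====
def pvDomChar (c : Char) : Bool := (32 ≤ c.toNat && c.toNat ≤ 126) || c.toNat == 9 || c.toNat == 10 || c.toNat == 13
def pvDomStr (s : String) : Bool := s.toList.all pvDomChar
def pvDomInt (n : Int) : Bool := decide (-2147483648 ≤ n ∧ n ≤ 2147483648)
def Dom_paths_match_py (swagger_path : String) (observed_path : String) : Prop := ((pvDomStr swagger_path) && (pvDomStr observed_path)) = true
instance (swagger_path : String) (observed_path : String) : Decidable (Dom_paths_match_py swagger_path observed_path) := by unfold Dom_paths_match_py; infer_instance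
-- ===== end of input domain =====

-- B compiles the swagger template into an Option-pattern (None = placeholder) and matches the
-- observed segments by structural recursion, dropping the strip('/') and the length pre-check
-- (objective: alternative decomposition, same cost).

-- ===== PORT A =====
-- the for-loop over zip(swagger_parts, observed_parts) with its early returns
def pmLoopA : List (List Char × List Char) → Bool
  | [] => true
  | (s, o) :: rest =>
    if PySem.Chars.startswith s ['{'] && PySem.Chars.endswith s ['}'] then pmLoopA rest
    else if s ≠ o then false
    else pmLoopA rest

def paths_match_py (swagger_path : String) (observed_path : String) : Bool :=
  let swagger_parts := (PySem.Chars.splitOn (PySem.Chars.stripChars swagger_path.toList ['/']) ['/']).filter (fun p => !p.isEmpty)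
  let observed_parts := (PySem.Chars.splitOn (PySem.Chars.stripChars observed_path.toList ['/']) ['/']).filter (fun p => !p.isEmpty)
  if swagger_parts.length ≠ observed_parts.length then false
  else pmLoopA (swagger_parts.zip observed_parts)

-- ===== PORT B =====
def pmCompile (p : List Char) : Option (List Char) :=
  if PySem.Chars.startswith p ['{'] && PySem.Chars.endswith p ['}'] then none else some p

-- _match: recursive matcher of an Option-pattern against observed segments
def pmMatch : List (Option (List Char)) → List (List Char) → Bool
  | [], [] => true
  | [], _ :: _ => false
  | _ :: _, [] => false
  | tok :: pat, seg :: parts => (tok == none || tok == some seg) && pmMatch pat parts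

def paths_match_py_alt (swagger_path : String) (observed_path : String) : Bool :=
  let pattern := ((PySem.Chars.splitOn swagger_path.toList ['/']).filter (fun p => !p.isEmpty)).map pmCompile
  let observed := (PySem.Chars.splitOn observed_path.toList ['/']).filter (fun p => !p.isEmpty)
  pmMatch pattern observed

-- ===== PRECONDITION & SPEC =====
def Spec_paths_match_py (swagger_path : String) (observed_path : String) (out : Bool) : Prop := out = paths_match_py_alt swagger_path observed_path
instance (swagger_path : String) (observed_path : String) (out : Bool) : Decidable (Spec_paths_match_py swagger_path observed_path out) := by unfold Spec_paths_match_py; infer_instance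

-- ===== CLAIM (what is proved, stated in full; the proofs are below) =====
def Claim_equal_paths_match_py : Prop := ∀ (swagger_path : String) (observed_path : String), Dom_paths_match_py swagger_path observed_path → Spec_paths_match_py swagger_path observed_path (paths_match_py swagger_path observed_path)

-- ===== LEMMAS AND PROOFS =====

-- structural version of PySem.Chars.splitOn on the single-character separator '/'
def pmSplit : List Char → List (List Char)
  | [] => [[]]
  | c :: rest =>
    if c = '/' then [] :: pmSplit rest
    else match pmSplit rest with
      | x :: xs => (c :: x) :: xs
      | [] => [[c]]

theorem pmSplit_ne_nil (l : List Char) : pmSplit l ≠ [] := by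
  cases l with
  | nil => simp [pmSplit]
  | cons c rest =>
    simp only [pmSplit]
    split_ifs
    · simp
    · cases h : pmSplit rest <;> simp

-- go-level spec of PySem.Chars.splitOn for sep = "/"
theorem pmSplit_go (fuel : Nat) (l cur : List Char) (acc : List (List Char)) (hf : l.length ≤ fuel) :
    PySem.Chars.splitOn.go ['/'] fuel l cur acc =
      acc.reverse ++ (match pmSplit l with
        | x :: xs => (cur.reverse ++ x) :: xs
        | [] => [cur.reverse]) := by
  induction fuel generalizing l cur acc with
  | zero =>
    have : l = [] := List.length_eq_zero_iff.mp (Nat.le_zero.mp hf)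
    subst this
    simp [PySem.Chars.splitOn.go, pmSplit]
  | succ f ih =>
    cases l with
    | nil => simp [PySem.Chars.splitOn.go, pmSplit]
    | cons c rest =>
      by_cases hc : c = '/'
      · subst hc
        have hpre : List.isPrefixOf ['/'] ('/' :: rest) = true := by
          simp [List.isPrefixOf]
        rw [show PySem.Chars.splitOn.go ['/'] (f+1) ('/' :: rest) cur acc =
              PySem.Chars.splitOn.go ['/'] f (List.drop 1 ('/' :: rest)) [] (cur.reverse :: acc) by
            simp [PySem.Chars.splitOn.go, hpre]]
        rw [List.drop_one, List.tail_cons,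
          ih rest [] (cur.reverse :: acc) (by simpa using Nat.le_of_succ_le_succ hf)]
        simp only [pmSplit]
        cases h : pmSplit rest with
        | nil => exact absurd h (pmSplit_ne_nil rest)
        | cons x xs => simp
      · have hpre : List.isPrefixOf ['/'] (c :: rest) = false := by
          simp [List.isPrefixOf]
          intro h; exact absurd h.symm hc
        rw [show PySem.Chars.splitOn.go ['/'] (f+1) (c :: rest) cur acc =
              PySem.Chars.splitOn.go ['/'] f rest (c :: cur) acc by
            simp [PySem.Chars.splitOn.go, hpre]]
        rw [ih rest (c :: cur) acc (by simpa using Nat.le_of_succ_le_succ hf)]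
        simp only [pmSplit, if_neg hc]
        cases h : pmSplit rest with
        | nil => exact absurd h (pmSplit_ne_nil rest)
        | cons x xs => simp

theorem splitOn_slash (l : List Char) : PySem.Chars.splitOn l ['/'] = pmSplit l := by
  rw [PySem.Chars.splitOn, pmSplit_go (l.length + 1) l [] [] (Nat.le_succ _)]
  cases h : pmSplit l with
  | nil => exact absurd h (pmSplit_ne_nil l)
  | cons x xs => simp

-- the nonempty segments of a path: maximal runs of non-'/' characters
def pmChunks : List Char → List (List Char)
  | [] => []
  | c :: rest =>
    if c = '/' then pmChunks rest
    else (c :: rest.takeWhile (· ≠ '/')) :: pmChunks (rest.dropWhile (· ≠ '/'))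
  termination_by l => l.length
  decreasing_by
  · simp
  · simp only [List.length_cons]
    have := List.length_dropWhile_le (fun c : Char => decide (c ≠ '/')) rest
    omega

-- head/tail shape of pmSplit
theorem pmSplit_shape (l : List Char) :
    (l.dropWhile (· ≠ '/') = [] ∧ pmSplit l = [l]) ∨
    (∃ r, l.dropWhile (· ≠ '/') = '/' :: r ∧ pmSplit l = l.takeWhile (· ≠ '/') :: pmSplit r) := by
  induction l with
  | nil => left; exact ⟨rfl, rfl⟩
  | cons c rest ih =>
    by_cases hc : c = '/'
    · subst hc
      right
      refine ⟨rest, by simp [List.dropWhile], by simp [pmSplit, List.takeWhile]⟩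
    · have htw : (c :: rest).takeWhile (· ≠ '/') = c :: rest.takeWhile (· ≠ '/') := by
        simp [List.takeWhile, hc]
      have hdw : (c :: rest).dropWhile (· ≠ '/') = rest.dropWhile (· ≠ '/') := by
        simp [List.dropWhile, hc]
      rcases ih with ⟨h1, h2⟩ | ⟨r, h1, h2⟩
      · left
        refine ⟨by rw [hdw]; exact h1, ?_⟩
        have : rest.takeWhile (· ≠ '/') = rest := by
          have := List.takeWhile_append_dropWhile (p := fun x => decide (x ≠ '/')) (l := rest)
          rw [h1, List.append_nil] at this; exact this
        simp [pmSplit, hc, h2]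
      · right
        refine ⟨r, by rw [hdw]; exact h1, ?_⟩
        rw [htw]
        simp only [pmSplit, if_neg hc, h2]

theorem filter_pmSplit_eq_chunks (l : List Char) :
    (pmSplit l).filter (fun p => !p.isEmpty) = pmChunks l := by
  induction hn : l.length using Nat.strong_induction_on generalizing l with
  | _ n ih =>
  subst hn
  cases l with
  | nil => simp [pmSplit, pmChunks]
  | cons c rest =>
    by_cases hc : c = '/'
    · subst hc
      rw [show pmSplit ('/' :: rest) = [] :: pmSplit rest by simp [pmSplit]]
      rw [show pmChunks ('/' :: rest) = pmChunks rest by simp [pmChunks]]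
      rw [show (([] : List Char) :: pmSplit rest).filter (fun p => !p.isEmpty)
            = (pmSplit rest).filter (fun p => !p.isEmpty) by simp]
      exact ih rest.length (by simp) rest rfl
    · rw [show pmChunks (c :: rest) =
            (c :: rest.takeWhile (· ≠ '/')) :: pmChunks (rest.dropWhile (· ≠ '/')) by
          simp [pmChunks, hc]]
      rcases pmSplit_shape (c :: rest) with ⟨h1, h2⟩ | ⟨r, h1, h2⟩
      · have hdw : rest.dropWhile (· ≠ '/') = [] := by
          simpa [List.dropWhile, hc] using h1
        have htw : rest.takeWhile (· ≠ '/') = rest := by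
          have := List.takeWhile_append_dropWhile (p := fun x => decide (x ≠ '/')) (l := rest)
          rw [hdw, List.append_nil] at this; exact this
        rw [h2, htw, hdw]
        rw [show pmChunks ([] : List Char) = [] by simp [pmChunks]]
        simp
      · have htw : (c :: rest).takeWhile (· ≠ '/') = c :: rest.takeWhile (· ≠ '/') := by
          simp [List.takeWhile, hc]
        have hdw : (c :: rest).dropWhile (· ≠ '/') = rest.dropWhile (· ≠ '/') := by
          simp [List.dropWhile, hc]
        have hr : rest.dropWhile (· ≠ '/') = '/' :: r := by rw [← hdw]; exact h1
        have hrlen : r.length < (c :: rest).length := by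
          have := List.length_dropWhile_le (fun x => decide (x ≠ '/')) rest
          rw [hr] at this
          simp at this ⊢; omega
        rw [h2, htw, hr]
        rw [show pmChunks ('/' :: r) = pmChunks r by simp [pmChunks]]
        rw [show ((c :: rest.takeWhile (· ≠ '/')) :: pmSplit r).filter (fun p => !p.isEmpty)
              = (c :: rest.takeWhile (· ≠ '/')) :: (pmSplit r).filter (fun p => !p.isEmpty) by
            simp]
        rw [ih r.length hrlen r rfl]

-- pmChunks ignores leading slashes
theorem pmChunks_dropWhile_slash (l : List Char) :
    pmChunks (l.dropWhile (· = '/')) = pmChunks l := by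
  induction l with
  | nil => rfl
  | cons c rest ih =>
    by_cases hc : c = '/'
    · subst hc
      rw [show ('/' :: rest).dropWhile (· = '/') = rest.dropWhile (· = '/') by
        simp [List.dropWhile]]
      rw [ih]
      simp [pmChunks]
    · rw [show (c :: rest).dropWhile (· = '/') = c :: rest by simp [List.dropWhile, hc]]

theorem pmChunks_all_slash (r : List Char) (h : ∀ c ∈ r, c = '/') : pmChunks r = [] := by
  induction r with
  | nil => simp [pmChunks]
  | cons c rest ih =>
    have hc : c = '/' := h c (by simp)
    subst hc
    rw [show pmChunks ('/' :: rest) = pmChunks rest by simp [pmChunks]]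
    exact ih (fun c hc => h c (by simp [hc]))

-- the head of a nonempty dropWhile fails the predicate
theorem pmDropWhileHeadNot {p : Char → Bool} : ∀ (l : List Char) (d : Char) (w : List Char),
    l.dropWhile p = d :: w → p d = false := by
  intro l
  induction l with
  | nil => intro d w h; simp [List.dropWhile] at h
  | cons c rest ih =>
    intro d w h
    by_cases hpc : p c = true
    · rw [List.dropWhile_cons_of_pos hpc] at h
      exact ih d w h
    · rw [List.dropWhile_cons_of_neg hpc] at h
      cases h
      simpa using hpc

-- pmChunks ignores a trailing run of slashes
theorem pmChunks_append_slash (u r : List Char) (h : ∀ c ∈ r, c = '/') :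
    pmChunks (u ++ r) = pmChunks u := by
  induction hn : u.length using Nat.strong_induction_on generalizing u with
  | _ n ih =>
  subst hn
  cases u with
  | nil =>
    simp only [List.nil_append]
    rw [pmChunks_all_slash r h]
    simp [pmChunks]
  | cons c u' =>
    by_cases hc : c = '/'
    · subst hc
      rw [show ('/' :: u') ++ r = '/' :: (u' ++ r) by simp]
      rw [show pmChunks ('/' :: (u' ++ r)) = pmChunks (u' ++ r) by simp [pmChunks]]
      rw [show pmChunks ('/' :: u') = pmChunks u' by simp [pmChunks]]
      exact ih u'.length (by simp) u' rfl
    · rw [show (c :: u') ++ r = c :: (u' ++ r) by simp]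
      rw [show pmChunks (c :: (u' ++ r)) =
            (c :: (u' ++ r).takeWhile (· ≠ '/')) :: pmChunks ((u' ++ r).dropWhile (· ≠ '/')) by
          simp [pmChunks, hc]]
      rw [show pmChunks (c :: u') =
            (c :: u'.takeWhile (· ≠ '/')) :: pmChunks (u'.dropWhile (· ≠ '/')) by
          simp [pmChunks, hc]]
      by_cases hall : u'.dropWhile (· ≠ '/') = []
      · have htwu : u'.takeWhile (· ≠ '/') = u' := by
          have := List.takeWhile_append_dropWhile (p := fun x => decide (x ≠ '/')) (l := u')
          rw [hall, List.append_nil] at this; exact this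
        have hup : ∀ x ∈ u', x ≠ '/' := by
          intro x hx
          have : x ∈ u'.takeWhile (· ≠ '/') := by rw [htwu]; exact hx
          simpa using List.mem_takeWhile_imp this
        have htw : (u' ++ r).takeWhile (· ≠ '/') = u' := by
          cases hrr : r with
          | nil => simpa [hrr] using htwu
          | cons d r' =>
            have hd : d = '/' := h d (by simp [hrr])
            rw [List.takeWhile_append]
            rw [htwu]
            subst hd
            simp [List.takeWhile]
        have hdw : (u' ++ r).dropWhile (· ≠ '/') = r := by
          rw [List.dropWhile_append]
          simp only [hall, List.isEmpty_nil, if_true]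
          cases hrr : r with
          | nil => simp
          | cons d r' =>
            have hd : d = '/' := h d (by simp [hrr])
            subst hd
            simp [List.dropWhile]
        rw [htw, hdw, hall, pmChunks_all_slash r h, htwu,
          show pmChunks ([] : List Char) = [] by simp [pmChunks]]
      · have hdwne := hall
        rw [List.takeWhile_append, List.dropWhile_append]
        have hne : u'.dropWhile (· ≠ '/') ≠ [] := hall
        have h1 : (u'.takeWhile (· ≠ '/')).length = u'.length → u'.dropWhile (· ≠ '/') = [] := by
          intro hlen
          have := List.takeWhile_append_dropWhile (p := fun x => decide (x ≠ '/')) (l := u')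
          have hlen2 : (u'.takeWhile (· ≠ '/')).length + (u'.dropWhile (· ≠ '/')).length = u'.length := by
            rw [← List.length_append, this]
          have : (u'.dropWhile (· ≠ '/')).length = 0 := by omega
          exact List.length_eq_zero_iff.mp this
        have hlenne : ¬ ((u'.takeWhile (· ≠ '/')).length = u'.length) := fun hl => hne (h1 hl)
        rw [if_neg hlenne, if_neg (show ¬ ((u'.dropWhile (· ≠ '/')).isEmpty = true) by
          simp only [List.isEmpty_iff]; exact hne)]
        obtain ⟨d, w, hdw⟩ : ∃ d w, u'.dropWhile (· ≠ '/') = d :: w := by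
          cases hx : u'.dropWhile (· ≠ '/') with
          | nil => exact absurd hx hne
          | cons d w => exact ⟨d, w, rfl⟩
        have hd : d = '/' := by
          have hpd := pmDropWhileHeadNot (p := fun x : Char => decide (x ≠ '/')) u' d w hdw
          simpa using hpd
        subst hd
        rw [hdw]
        rw [show ('/' :: w) ++ r = '/' :: (w ++ r) by simp]
        rw [show pmChunks ('/' :: (w ++ r)) = pmChunks (w ++ r) by simp [pmChunks]]
        rw [show pmChunks ('/' :: w) = pmChunks w by simp [pmChunks]]
        have hwlen : w.length < (c :: u').length := by
          have := List.length_dropWhile_le (fun x => decide (x ≠ '/')) u'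
          rw [hdw] at this
          simp at this ⊢; omega
        rw [ih w.length hwlen w rfl]

-- the normalization A performs equals the one B performs: strip("/") is redundant
theorem chunks_stripChars (l : List Char) :
    pmChunks (PySem.Chars.stripChars l ['/']) = pmChunks l := by
  rw [PySem.Chars.stripChars]
  have hp : (fun c => List.contains ['/'] c) = (fun c : Char => decide (c = '/')) := by
    funext c; simp
  rw [hp]
  set t := l.dropWhile (fun c => decide (c = '/')) with ht
  have hrd : (List.dropWhile (fun c => decide (c = '/')) t.reverse).reverse
      = t.rdropWhile (fun c => decide (c = '/')) := by
    rw [List.rdropWhile]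
  rw [hrd]
  have hsplit : t.rdropWhile (fun c => decide (c = '/')) ++ t.rtakeWhile (fun c => decide (c = '/')) = t :=
    List.rdropWhile_append_rtakeWhile (p := fun c : Char => decide (c = '/')) (l := t)
  have hall : ∀ c ∈ t.rtakeWhile (fun c => decide (c = '/')), c = '/' := by
    intro c hc
    simpa using List.mem_rtakeWhile_imp hc
  calc pmChunks (t.rdropWhile (fun c => decide (c = '/')))
      = pmChunks (t.rdropWhile (fun c => decide (c = '/')) ++ t.rtakeWhile (fun c => decide (c = '/'))) :=
        (pmChunks_append_slash _ _ hall).symm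
    _ = pmChunks t := by rw [hsplit]
    _ = pmChunks l := by rw [ht]; exact pmChunks_dropWhile_slash l

-- the length-check + zip loop of A equals B's recursive matcher on the compiled pattern
theorem loop_eq_match (sp op : List (List Char)) :
    (if sp.length ≠ op.length then false else pmLoopA (sp.zip op)) = pmMatch (sp.map pmCompile) op := by
  induction sp generalizing op with
  | nil =>
    cases op with
    | nil => simp [pmLoopA, pmMatch]
    | cons o ot => simp [pmMatch]
  | cons s st ih =>
    cases op with
    | nil => simp [pmMatch]
    | cons o ot =>
      simp only [List.map_cons, List.zip_cons_cons, List.length_cons]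
      rw [show pmMatch (pmCompile s :: st.map pmCompile) (o :: ot) =
            ((pmCompile s == none || pmCompile s == some o) && pmMatch (st.map pmCompile) ot) from rfl]
      by_cases hlen : st.length = ot.length
      · have ih' : pmLoopA (st.zip ot) = pmMatch (st.map pmCompile) ot := by
          have h := ih ot
          rwa [if_neg (show ¬(st.length ≠ ot.length) by omega)] at h
        rw [if_neg (show ¬(st.length + 1 ≠ ot.length + 1) by omega)]
        rw [show pmLoopA ((s, o) :: st.zip ot) =
              (if PySem.Chars.startswith s ['{'] && PySem.Chars.endswith s ['}'] then pmLoopA (st.zip ot)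
               else if s ≠ o then false else pmLoopA (st.zip ot)) from rfl]
        rw [← ih']
        unfold pmCompile
        split_ifs with hwild hso
        · simp
        · simp [hso]
        · simp only [ne_eq, not_not] at hso
          subst hso
          simp
      · have hfalse : pmMatch (st.map pmCompile) ot = false := by
          have h := ih ot
          rw [if_pos (show st.length ≠ ot.length by omega)] at h
          exact h.symm
        rw [if_pos (show st.length + 1 ≠ ot.length + 1 by omega), hfalse]
        simp

-- ===== VERDICT (by name: the statement is the Claim_ definition above) =====
theorem paths_match_py_spec : Claim_equal_paths_match_py := by
  intro swagger_path observed_path _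
  unfold Spec_paths_match_py paths_match_py paths_match_py_alt
  simp only [splitOn_slash]
  rw [filter_pmSplit_eq_chunks, filter_pmSplit_eq_chunks, filter_pmSplit_eq_chunks,
    filter_pmSplit_eq_chunks, chunks_stripChars, chunks_stripChars]
  exact loop_eq_match _ _
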